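-- pv_equiv track=rewrite | github.com/nickgu18/mymonorepo | projects/gv_case_study/solution_sets/iteration_5/prev_pipeline.py | _component_sizes
-- ===== SOURCE A (Python) =====
-- from collections import defaultdict, deque
-- from typing import Mapping
--
-- def _component_sizes(adjacency: Mapping[str, set[str]]) -> dict[str, int]:
--     sizes: dict[str, int] = {}
--     visited: set[str] = set()
--     for node in adjacency.keys():
--         if node in visited:
--             continue
--         stack = deque([node])
--         component: set[str] = set()
--         while stack:
--             current = stack.pop()
--             if current in component:
--                 continue
--             component.add(current)
--             for neighbor in adjacency.get(current, set()):
--                 if neighbor not in component: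
--                     stack.append(neighbor)
--         for member in component:
--             sizes[member] = max(len(component) - 1, 0)
--         visited.update(component)
--     return sizes
-- ===== SOURCE B (Python) =====
-- def _component_sizes(adjacency):
--     sizes = {}
--
--     def visit(node, comp):
--         if node not in comp:
--             comp.append(node)
--             for neighbor in adjacency.get(node, ()):
--                 visit(neighbor, comp)
--         return comp
--
--     for node in adjacency:
--         if node not in sizes:
--             comp = visit(node, [])
--             for member in comp:
--                 sizes[member] = len(comp) - 1
--     return sizes
-- ===== Notes on version B (the rewrite author's own statement) =====
-- stated objective: simpler
-- what changed: Replaces the explicit deque/stack DFS with re-check-at-pop, the separate component set, the visited set and the max() clamp by a plain recursive DFS that builds each component as an ordered list, skipping already-emitted start keys via membership in the result dict (union-find, as hinted, would be wrong here: the traversal follows directed edges, so the regions are per-key reachability sets, not undirected components).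
import Mathlib
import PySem

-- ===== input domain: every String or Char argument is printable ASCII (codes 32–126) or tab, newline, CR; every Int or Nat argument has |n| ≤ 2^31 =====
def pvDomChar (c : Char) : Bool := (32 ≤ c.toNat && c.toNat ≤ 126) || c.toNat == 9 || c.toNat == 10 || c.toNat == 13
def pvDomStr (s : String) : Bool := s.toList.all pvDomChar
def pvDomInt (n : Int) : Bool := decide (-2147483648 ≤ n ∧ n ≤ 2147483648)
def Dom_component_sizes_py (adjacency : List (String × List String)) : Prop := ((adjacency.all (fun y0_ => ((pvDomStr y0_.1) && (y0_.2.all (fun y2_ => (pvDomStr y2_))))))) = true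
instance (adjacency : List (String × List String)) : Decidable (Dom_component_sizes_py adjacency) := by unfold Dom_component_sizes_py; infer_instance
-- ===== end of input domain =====

-- B replaces A's deque/stack DFS (re-check at pop, separate component set, visited set, max() clamp) by a
-- plain recursive DFS building each component as an ordered list, skipping keys already in the result dict
-- (objective: simpler; same asymptotic cost). Both Pythons iterate sets, whose order the final dict —
-- compared as a dict — does not depend on; each port fixes a definite order inside that nondeterminism.

-- ===== PORT A =====
-- all node names the traversal can ever meet: the dict's keys and every neighbour list it stores
def csUniv (d : PySem.Dict String (List String)) : List String := d.keys ++ d.values.flatten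

-- termination helpers for csDfsA (cited in its decreasing_by)
theorem csLen_le_flatten {α : Type} (l : List (List α)) (v : List α) (h : v ∈ l) :
    v.length ≤ l.flatten.length := by
  rw [List.length_flatten]
  exact List.single_le_sum (fun x _ => Nat.zero_le x) _ (List.mem_map_of_mem h)

theorem csGetD_mem_flatten (d : PySem.Dict String (List String)) (u : String) :
    ∀ x ∈ d.getD u [], x ∈ d.values.flatten := by
  intro x hx
  rcases h : d.get? u with _ | v
  · rw [PySem.Dict.getD_eq_get?_getD, h] at hx; simp at hx
  · rw [PySem.Dict.getD_eq_get?_getD, h] at hx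
    simp only [Option.getD_some] at hx
    have hv : v ∈ d.values := by
      have := PySem.Dict.mem_items_of_get?_eq_some (d := d) h
      simp only [PySem.Dict.values]
      exact List.mem_map_of_mem this
    exact List.mem_flatten.mpr ⟨v, hv, hx⟩

theorem csGetD_len (d : PySem.Dict String (List String)) (u : String) :
    (d.getD u []).length ≤ d.values.flatten.length := by
  rcases h : d.get? u with _ | v
  · rw [PySem.Dict.getD_eq_get?_getD, h]; simp
  · rw [PySem.Dict.getD_eq_get?_getD, h]
    simp only [Option.getD_some]
    have hv : v ∈ d.values := by
      have := PySem.Dict.mem_items_of_get?_eq_some (d := d) h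
      simp only [PySem.Dict.values]
      exact List.mem_map_of_mem this
    exact csLen_le_flatten _ _ hv

-- A's inner while-loop: stack with its top at the END (deque.pop pops the right end); component = Python
-- set in insertion order; neighbours of `current` are appended left-to-right, filtered by membership.
def csDfsA (d : PySem.Dict String (List String)) (stack : List String) (comp : PySem.Set String) : List String :=
  if hs : stack = [] then comp
  else
    let current := stack.getLast hs
    let rest := stack.dropLast
    if PySem.Set.contains comp current then csDfsA d rest comp
    else csDfsA d (rest ++ (d.getD current []).filter (fun nb => !(PySem.Set.contains comp nb)))
           (PySem.Set.add comp current)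
termination_by (((csUniv d ++ stack).toFinset \ comp.toFinset).card) * ((csUniv d).length + 2) + stack.length
decreasing_by
  · -- current already in the component: the stack shrinks, the sdiff cannot grow
    have hsub : ((csUniv d ++ stack.dropLast).toFinset \ comp.toFinset).card
        ≤ ((csUniv d ++ stack).toFinset \ comp.toFinset).card := by
      apply Finset.card_le_card
      apply Finset.sdiff_subset_sdiff _ (Finset.Subset.refl _)
      intro x hx
      simp only [List.mem_toFinset, List.mem_append] at hx ⊢
      exact hx.imp id (fun h => List.dropLast_subset _ h)
    have hlen : stack.dropLast.length = stack.length - 1 := List.length_dropLast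
    have hpos : 1 ≤ stack.length := List.length_pos_of_ne_nil hs
    have := Nat.mul_le_mul_right ((csUniv d).length + 2) hsub
    omega
  · -- a new node enters the component: the sdiff strictly shrinks, dominating the stack growth
    rename_i hc
    set U := csUniv d with hU
    set cur := stack.getLast hs
    have hcur_mem : cur ∈ (U ++ stack).toFinset := by
      simp only [List.mem_toFinset, List.mem_append]
      exact Or.inr (List.getLast_mem hs)
    have hcur_notc : cur ∉ comp.toFinset := by
      simp only [List.mem_toFinset]
      intro h
      exact hc ((PySem.Set.contains_iff _ _).mpr h)
    have hcur_in : cur ∈ (U ++ stack).toFinset \ comp.toFinset :=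
      Finset.mem_sdiff.mpr ⟨hcur_mem, hcur_notc⟩
    have hsub : ((U ++ (stack.dropLast ++ (d.getD cur []).filter (fun nb => !(PySem.Set.contains comp nb)))).toFinset
          \ (PySem.Set.add comp cur).toFinset)
        ⊆ ((U ++ stack).toFinset \ comp.toFinset).erase cur := by
      intro x hx
      rcases Finset.mem_sdiff.mp hx with ⟨hx1, hx2⟩
      simp only [List.mem_toFinset, List.mem_append] at hx1
      have hxadd : x ∉ PySem.Set.add comp cur := by
        simpa [List.mem_toFinset] using hx2
      have hxne : x ≠ cur := fun h => hxadd (by rw [h]; exact (PySem.Set.mem_add _ _ _).mpr (Or.inr rfl))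
      have hxcomp : x ∉ comp := fun h => hxadd ((PySem.Set.mem_add _ _ _).mpr (Or.inl h))
      refine Finset.mem_erase.mpr ⟨hxne, Finset.mem_sdiff.mpr ⟨?_, by simpa [List.mem_toFinset] using hxcomp⟩⟩
      simp only [List.mem_toFinset, List.mem_append]
      rcases hx1 with h | h | h
      · exact Or.inl h
      · exact Or.inr (List.dropLast_subset _ h)
      · have := List.mem_of_mem_filter h
        have hfl := csGetD_mem_flatten d cur _ this
        exact Or.inl (by rw [hU]; exact List.mem_append.mpr (Or.inr hfl))
    have hcard : (((U ++ (stack.dropLast ++ (d.getD cur []).filter (fun nb => !(PySem.Set.contains comp nb)))).toFinset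
          \ (PySem.Set.add comp cur).toFinset)).card
        ≤ ((U ++ stack).toFinset \ comp.toFinset).card - 1 := by
      have := Finset.card_le_card hsub
      rwa [Finset.card_erase_of_mem hcur_in] at this
    have hpos : 1 ≤ ((U ++ stack).toFinset \ comp.toFinset).card :=
      Finset.card_pos.mpr ⟨cur, hcur_in⟩
    have hflen : ((d.getD cur []).filter (fun nb => !(PySem.Set.contains comp nb))).length ≤ U.length := by
      calc ((d.getD cur []).filter _).length ≤ (d.getD cur []).length := List.length_filter_le _ _
        _ ≤ d.values.flatten.length := csGetD_len d cur
        _ ≤ U.length := by rw [hU, csUniv, List.length_append]; omega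
    have hlen : stack.dropLast.length = stack.length - 1 := List.length_dropLast
    have hspos : 1 ≤ stack.length := List.length_pos_of_ne_nil hs
    set C := U.length + 2
    set a := ((U ++ stack).toFinset \ comp.toFinset).card
    set n := (((U ++ (stack.dropLast ++ (d.getD cur []).filter (fun nb => !(PySem.Set.contains comp nb)))).toFinset
          \ (PySem.Set.add comp cur).toFinset)).card
    have h1 : n * C ≤ (a - 1) * C := Nat.mul_le_mul_right _ hcard
    have h2 : (a - 1) * C + C = a * C := by
      have h3 : a - 1 + 1 = a := Nat.succ_pred_eq_of_pos hpos
      calc (a - 1) * C + C = (a - 1 + 1) * C := by ring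
        _ = a * C := by rw [h3]
    simp only [List.length_append]
    omega

-- one iteration of A's `for node in adjacency.keys()` loop; state = (sizes, visited)
def csStepA (d : PySem.Dict String (List String))
    (st : PySem.Dict String Int × PySem.Set String) (node : String) :
    PySem.Dict String Int × PySem.Set String :=
  if PySem.Set.contains st.2 node then st
  else
    let comp := csDfsA d [node] PySem.Set.empty
    (comp.foldl (fun s m => s.insert m (max ((comp.length : Int) - 1) 0)) st.1,
     PySem.Set.update st.2 comp)

def component_sizes_py (adjacency : List (String × List String)) : List (String × Int) :=
  let d := PySem.Dict.ofList adjacency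
  ((d.keys.foldl (csStepA d) (PySem.Dict.empty, PySem.Set.empty)).1).items

-- ===== PORT B =====
-- B's recursive `visit`, ported with fuel |csUniv d| + 1: every level of real work appends a new node of
-- csUniv d to comp before recursing, so this fuel provably never runs out (csB_fuel / csB_expand below).
-- B's Python iterates the neighbour SET (order unspecified); the port fixes the reversed-list order.
def csDfsB (d : PySem.Dict String (List String)) : Nat → String → List String → List String
  | 0, _, comp => comp
  | f + 1, u, comp =>
    if comp.contains u then comp
    else ((d.getD u []).reverse).foldl (fun c v => csDfsB d f v c) (comp ++ [u])

-- one iteration of B's `for node in adjacency` loop; state = the sizes dict alone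
def csStepB (d : PySem.Dict String (List String))
    (sizes : PySem.Dict String Int) (node : String) : PySem.Dict String Int :=
  if sizes.contains node then sizes
  else
    let comp := csDfsB d ((csUniv d).length + 1) node []
    comp.foldl (fun s m => s.insert m ((comp.length : Int) - 1)) sizes

def component_sizes_py_alt (adjacency : List (String × List String)) : List (String × Int) :=
  let d := PySem.Dict.ofList adjacency
  (d.keys.foldl (csStepB d) PySem.Dict.empty).items

-- ===== PRECONDITION & SPEC =====
def Spec_component_sizes_py (adjacency : List (String × List String)) (out : List (String × Int)) : Prop := out = component_sizes_py_alt adjacency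
instance (adjacency : List (String × List String)) (out : List (String × Int)) : Decidable (Spec_component_sizes_py adjacency out) := by unfold Spec_component_sizes_py; infer_instance

-- ===== CLAIM (what is proved, stated in full; the proofs are below) =====
def Claim_equal_component_sizes_py : Prop := ∀ (adjacency : List (String × List String)), Dom_component_sizes_py adjacency → Spec_component_sizes_py adjacency (component_sizes_py adjacency)

-- ===== LEMMAS AND PROOFS =====

-- a fold whose step keeps its accumulator as a prefix keeps the start as a prefix
theorem csFoldl_prefix (step : List String → String → List String)
    (h : ∀ c v, c <+: step c v) : ∀ (l : List String) (c : List String), c <+: l.foldl step c := by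
  intro l
  induction l with
  | nil => intro c; exact List.prefix_rfl
  | cons v t ih => intro c; exact (h c v).trans (ih (step c v))

theorem csB_prefix (d : PySem.Dict String (List String)) :
    ∀ (f : Nat) (u : String) (c : List String), c <+: csDfsB d f u c := by
  intro f
  induction f with
  | zero => intro u c; exact List.prefix_rfl
  | succ f ih =>
    intro u c
    rw [csDfsB]
    split
    · exact List.prefix_rfl
    · exact (List.prefix_append c [u]).trans (csFoldl_prefix _ (fun c v => ih v c) _ _)

theorem csB_subset (d : PySem.Dict String (List String)) :
    ∀ (f : Nat) (u : String) (c : List String), u ∈ csUniv d → (∀ x ∈ c, x ∈ csUniv d) →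
      ∀ x ∈ csDfsB d f u c, x ∈ csUniv d := by
  intro f
  induction f with
  | zero => intro u c _ hc; exact hc
  | succ f ih =>
    intro u c hu hc
    rw [csDfsB]
    split
    · exact hc
    · have hacc : ∀ x ∈ c ++ [u], x ∈ csUniv d := by
        intro x hx
        rcases List.mem_append.mp hx with h | h
        · exact hc x h
        · simp at h; subst h; exact hu
      have hl : ∀ v ∈ (d.getD u []).reverse, v ∈ csUniv d := by
        intro v hv
        rw [List.mem_reverse] at hv
        exact List.mem_append.mpr (Or.inr (csGetD_mem_flatten d u v hv))
      -- fold preserves "⊆ csUniv d"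
      clear hc hu
      generalize (d.getD u []).reverse = l at hl
      generalize (c ++ [u]) = acc at hacc
      induction l generalizing acc with
      | nil => exact hacc
      | cons v t iht =>
        simp only [List.foldl_cons]
        exact iht (fun w hw => hl w (List.mem_cons_of_mem _ hw))
          (csDfsB d f v acc) (ih v acc (hl v List.mem_cons_self) hacc)

theorem csB_noop (d : PySem.Dict String (List String)) (f : Nat) (u : String) (c : List String)
    (h : c.contains u = true) : csDfsB d f u c = c := by
  cases f with
  | zero => rfl
  | succ f => rw [csDfsB, if_pos h]

-- a prefix-larger accumulator leaves fewer universe nodes outside it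
theorem csCard_mono (U : List String) {c c' : List String} (h : c ⊆ c') :
    (U.toFinset \ c'.toFinset).card ≤ (U.toFinset \ c.toFinset).card := by
  apply Finset.card_le_card
  apply Finset.sdiff_subset_sdiff (Finset.Subset.refl _)
  intro x hx
  rw [List.mem_toFinset] at hx ⊢
  exact h hx

-- fuel irrelevance: any fuel above |csUniv d \ comp| computes the true DFS result
theorem csB_fuel (d : PySem.Dict String (List String)) :
    ∀ (m f₁ f₂ : Nat) (u : String) (c : List String),
      ((csUniv d).toFinset \ c.toFinset).card = m → m < f₁ → m < f₂ →
      u ∈ csUniv d → (∀ x ∈ c, x ∈ csUniv d) →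
      csDfsB d f₁ u c = csDfsB d f₂ u c := by
  intro m
  induction m using Nat.strong_induction_on with
  | _ m IH =>
    intro f₁ f₂ u c hm h1 h2 hu hc
    match f₁, f₂ with
    | a + 1, b + 1 =>
      rw [csDfsB, csDfsB]
      by_cases hcont : c.contains u = true
      · rw [if_pos hcont, if_pos hcont]
      · rw [if_neg hcont, if_neg hcont]
        have hnc : u ∉ c := fun h => hcont (List.contains_iff_mem.mpr h)
        have hmpos : 1 ≤ m := by
          have : u ∈ (csUniv d).toFinset \ c.toFinset := by
            rw [Finset.mem_sdiff, List.mem_toFinset, List.mem_toFinset]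
            exact ⟨hu, hnc⟩
          have := Finset.card_pos.mpr ⟨u, this⟩
          omega
        have hacc : ∀ x ∈ c ++ [u], x ∈ csUniv d := by
          intro x hx
          rcases List.mem_append.mp hx with h | h
          · exact hc x h
          · simp at h; subst h; exact hu
        have hcard : ((csUniv d).toFinset \ (c ++ [u]).toFinset).card = m - 1 := by
          have : (c ++ [u]).toFinset = insert u c.toFinset := by
            simp [List.toFinset_append]
          rw [this, Finset.sdiff_insert]
          rw [Finset.card_erase_of_mem (by rw [Finset.mem_sdiff, List.mem_toFinset, List.mem_toFinset]; exact ⟨hu, hnc⟩), hm]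
        have hl : ∀ v ∈ (d.getD u []).reverse, v ∈ csUniv d := by
          intro v hv
          rw [List.mem_reverse] at hv
          exact List.mem_append.mpr (Or.inr (csGetD_mem_flatten d u v hv))
        -- walk the two folds in lockstep; the accumulator only grows
        have hstart : ((csUniv d).toFinset \ (c ++ [u]).toFinset).card < m := by omega
        have ha : ((csUniv d).toFinset \ (c ++ [u]).toFinset).card < a := by omega
        have hb : ((csUniv d).toFinset \ (c ++ [u]).toFinset).card < b := by omega
        clear hcard hmpos hm hnc hcont h1 h2 hc hu
        generalize (d.getD u []).reverse = l at hl
        generalize hg : (c ++ [u]) = acc at *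
        clear hg
        induction l generalizing acc with
        | nil => rfl
        | cons v t iht =>
          simp only [List.foldl_cons]
          have hv : v ∈ csUniv d := hl v List.mem_cons_self
          have heq : csDfsB d a v acc = csDfsB d b v acc :=
            IH _ hstart a b v acc rfl ha hb hv hacc
          rw [heq]
          have hsub : acc ⊆ csDfsB d b v acc := (csB_prefix d b v acc).subset
          have hmono := csCard_mono (csUniv d) hsub
          exact iht (fun w hw => hl w (List.mem_cons_of_mem _ hw)) (csDfsB d b v acc)
            (csB_subset d b v acc hv hacc) (lt_of_le_of_lt hmono hstart)
            (lt_of_le_of_lt hmono ha) (lt_of_le_of_lt hmono hb)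

-- lifting every step of a fold from one sufficient fuel to another
theorem csFoldl_fuel (d : PySem.Dict String (List String)) (a b : Nat) :
    ∀ (l acc : List String), (∀ v ∈ l, v ∈ csUniv d) → (∀ x ∈ acc, x ∈ csUniv d) →
      ((csUniv d).toFinset \ acc.toFinset).card < a → ((csUniv d).toFinset \ acc.toFinset).card < b →
      l.foldl (fun c v => csDfsB d a v c) acc = l.foldl (fun c v => csDfsB d b v c) acc := by
  intro l
  induction l with
  | nil => intro acc _ _ _ _; rfl
  | cons v t ih =>
    intro acc hl hacc ha hb
    simp only [List.foldl_cons]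
    have hv : v ∈ csUniv d := hl v List.mem_cons_self
    have heq : csDfsB d a v acc = csDfsB d b v acc :=
      csB_fuel d _ a b v acc rfl ha hb hv hacc
    rw [heq]
    have hmono := csCard_mono (csUniv d) (csB_prefix d b v acc).subset
    exact ih (csDfsB d b v acc) (fun w hw => hl w (List.mem_cons_of_mem _ hw))
      (csB_subset d b v acc hv hacc) (lt_of_le_of_lt hmono ha) (lt_of_le_of_lt hmono hb)

-- neighbours already in the component are no-ops for the DFS fold, so A's push-filter can be dropped
theorem csFoldl_filter (d : PySem.Dict String (List String)) (N : Nat) (c₀ : PySem.Set String) :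
    ∀ (l acc : List String), c₀ ⊆ acc →
      (l.filter (fun nb => !(PySem.Set.contains c₀ nb))).foldl (fun c v => csDfsB d N v c) acc
        = l.foldl (fun c v => csDfsB d N v c) acc := by
  intro l
  induction l with
  | nil => intro acc _; rfl
  | cons v t ih =>
    intro acc hsub
    by_cases hv : PySem.Set.contains c₀ v = true
    · rw [List.filter_cons_of_neg (by simp only [Bool.not_eq_true']; simpa using hv)]
      simp only [List.foldl_cons]
      have hvacc : v ∈ acc := hsub ((PySem.Set.contains_iff _ _).mp hv)
      rw [csB_noop d N v acc (List.contains_iff_mem.mpr hvacc)]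
      exact ih acc hsub
    · rw [List.filter_cons_of_pos (by simpa using hv)]
      simp only [List.foldl_cons]
      exact ih (csDfsB d N v acc) (fun x hx => (csB_prefix d N v acc).subset (hsub hx))

-- with the canonical fuel, one DFS call unfolds to the fold A's loop produces
theorem csB_expand (d : PySem.Dict String (List String)) (u : String) (c : PySem.Set String)
    (hu : u ∈ csUniv d) (hc : ∀ x ∈ c, x ∈ csUniv d) (hnc : u ∉ c) :
    csDfsB d ((csUniv d).length + 1) u c
      = (((d.getD u []).filter (fun nb => !(PySem.Set.contains c nb))).reverse).foldl
          (fun a v => csDfsB d ((csUniv d).length + 1) v a) (c ++ [u]) := by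
  rw [csDfsB]
  rw [if_neg (by intro h; exact hnc (List.contains_iff_mem.mp h))]
  have hacc : ∀ x ∈ c ++ [u], x ∈ csUniv d := by
    intro x hx
    rcases List.mem_append.mp hx with h | h
    · exact hc x h
    · simp at h; subst h; exact hu
  have hcard : ((csUniv d).toFinset \ (c ++ [u]).toFinset).card < (csUniv d).length := by
    have h1 : ((csUniv d).toFinset \ (c ++ [u]).toFinset).card
        ≤ ((csUniv d).toFinset.erase u).card := by
      apply Finset.card_le_card
      intro x hx
      rcases Finset.mem_sdiff.mp hx with ⟨hx1, hx2⟩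
      refine Finset.mem_erase.mpr ⟨?_, hx1⟩
      intro h; subst h
      exact hx2 (by rw [List.mem_toFinset]; exact List.mem_append.mpr (Or.inr (by simp)))
    have h2 : ((csUniv d).toFinset.erase u).card = (csUniv d).toFinset.card - 1 :=
      Finset.card_erase_of_mem (List.mem_toFinset.mpr hu)
    have h3 : (csUniv d).toFinset.card ≤ (csUniv d).length := List.toFinset_card_le _
    have h4 : 1 ≤ (csUniv d).toFinset.card :=
      Finset.card_pos.mpr ⟨u, List.mem_toFinset.mpr hu⟩
    omega
  have hl : ∀ v ∈ (d.getD u []).reverse, v ∈ csUniv d := by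
    intro v hv
    rw [List.mem_reverse] at hv
    exact List.mem_append.mpr (Or.inr (csGetD_mem_flatten d u v hv))
  have hlift := csFoldl_fuel d (csUniv d).length ((csUniv d).length + 1)
    ((d.getD u []).reverse) (c ++ [u]) hl hacc hcard (by omega)
  rw [hlift]
  rw [← List.filter_reverse]
  rw [csFoldl_filter d ((csUniv d).length + 1) c ((d.getD u []).reverse) (c ++ [u])
    (fun x hx => List.mem_append.mpr (Or.inl hx))]

-- the bridge: A's pop-right worklist loop is B's recursive DFS folded over the reversed stack
theorem csAB_bridge (d : PySem.Dict String (List String)) :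
    ∀ (stack comp : List String), (∀ x ∈ stack, x ∈ csUniv d) → (∀ x ∈ comp, x ∈ csUniv d) →
      csDfsA d stack comp
        = stack.reverse.foldl (fun c u => csDfsB d ((csUniv d).length + 1) u c) comp := by
  intro stack comp
  induction stack, comp using csDfsA.induct d with
  | case1 comp =>
    intro _ _
    rw [csDfsA, dif_pos rfl, List.reverse_nil, List.foldl_nil]
  | case2 stack comp hs current rest hcont ih =>
    intro hst hcm
    rw [csDfsA, dif_neg hs, if_pos hcont]
    rw [ih (fun x hx => hst x (List.dropLast_subset _ hx)) hcm]
    conv_rhs => rw [← List.dropLast_append_getLast hs]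
    rw [List.reverse_append, List.reverse_singleton, List.singleton_append, List.foldl_cons]
    have hmem : current ∈ comp := (PySem.Set.contains_iff _ _).mp hcont
    rw [csB_noop d _ (stack.getLast hs) comp (List.contains_iff_mem.mpr hmem)]
  | case3 stack comp hs current rest hcont ih =>
    intro hst hcm
    have hcur : stack.getLast hs ∈ csUniv d := hst _ (List.getLast_mem hs)
    have hnc : stack.getLast hs ∉ comp := fun h => hcont ((PySem.Set.contains_iff _ _).mpr h)
    rw [csDfsA, dif_neg hs, if_neg hcont]
    have hst' : ∀ x ∈ stack.dropLast ++ (d.getD (stack.getLast hs) []).filter (fun nb => !(PySem.Set.contains comp nb)), x ∈ csUniv d := by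
      intro x hx
      rcases List.mem_append.mp hx with h | h
      · exact hst x (List.dropLast_subset _ h)
      · exact List.mem_append.mpr (Or.inr (csGetD_mem_flatten d _ _ (List.mem_of_mem_filter h)))
    have hcm' : ∀ x ∈ PySem.Set.add comp (stack.getLast hs), x ∈ csUniv d := by
      intro x hx
      rcases (PySem.Set.mem_add _ _ _).mp hx with h | h
      · exact hcm x h
      · subst h; exact hcur
    rw [ih hst' hcm']
    rw [List.reverse_append, List.foldl_append]
    conv_rhs => rw [← List.dropLast_append_getLast hs]
    rw [List.reverse_append, List.reverse_singleton, List.singleton_append, List.foldl_cons]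
    congr 1
    rw [PySem.Set.add_of_not_mem hnc]
    exact (csB_expand d (stack.getLast hs) comp hcur hcm hnc).symm

-- the outer loops agree: A's (sizes, visited) state vs B's sizes dict whose key set IS visited
theorem csOuter (d : PySem.Dict String (List String)) :
    ∀ (l : List String) (sA : PySem.Dict String Int) (vis : PySem.Set String) (sB : PySem.Dict String Int),
      (∀ x ∈ l, x ∈ d.keys) → sA = sB → (∀ x, x ∈ vis ↔ x ∈ sB.keys) →
      (l.foldl (csStepA d) (sA, vis)).1 = l.foldl (csStepB d) sB := by
  intro l
  induction l with
  | nil => intro sA vis sB _ hAB _; exact hAB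
  | cons node t ih =>
    intro sA vis sB hl hAB hinv
    have hnodeU : node ∈ csUniv d :=
      List.mem_append.mpr (Or.inl (hl node List.mem_cons_self))
    simp only [List.foldl_cons, csStepA, csStepB]
    by_cases hn : node ∈ vis
    · rw [if_pos ((PySem.Set.contains_iff _ _).mpr hn),
        if_pos ((PySem.Dict.contains_iff_mem_keys _ _).mpr ((hinv node).mp hn))]
      exact ih sA vis sB (fun x hx => hl x (List.mem_cons_of_mem _ hx)) hAB hinv
    · rw [if_neg (fun h => hn ((PySem.Set.contains_iff _ _).mp h)),
        if_neg (fun h => hn ((hinv node).mpr ((PySem.Dict.contains_iff_mem_keys _ _).mp h)))]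
      have hcomp : csDfsA d [node] PySem.Set.empty
          = csDfsB d ((csUniv d).length + 1) node [] := by
        rw [csAB_bridge d [node] PySem.Set.empty
          (by intro x hx; simp at hx; subst hx; exact hnodeU)
          (by intro x hx; simp [PySem.Set.empty] at hx)]
        simp [PySem.Set.empty]
      rw [hcomp]
      set comp := csDfsB d ((csUniv d).length + 1) node [] with hcompdef
      have hpre : [node] <+: comp := by
        rw [hcompdef, csDfsB, if_neg (by simp)]
        exact csFoldl_prefix _ (fun c v => csB_prefix d _ v c) _ _
      have hlen : 1 ≤ comp.length := by
        have := hpre.length_le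
        simpa using this
      have hmax : max ((comp.length : Int) - 1) 0 = (comp.length : Int) - 1 := by
        apply max_eq_left
        have : (1 : Int) ≤ (comp.length : Int) := by exact_mod_cast hlen
        omega
      simp only [hmax]
      apply ih _ _ _ (fun x hx => hl x (List.mem_cons_of_mem _ hx))
      · rw [hAB]
      · intro x
        have hkeys : (comp.foldl (fun s m => s.insert m ((comp.length : Int) - 1)) sB).keys
            = PySem.Set.update sB.keys comp :=
          PySem.Dict.keys_foldl_insert comp (fun _ _ => ((comp.length : Int) - 1)) sB
        rw [hkeys, PySem.Set.mem_update, PySem.Set.mem_update]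
        exact or_congr (hinv x) Iff.rfl

-- ===== VERDICT (by name: the statement is the Claim_ definition above) =====
theorem component_sizes_py_spec : Claim_equal_component_sizes_py := by
  intro adjacency _
  show component_sizes_py adjacency = component_sizes_py_alt adjacency
  simp only [component_sizes_py, component_sizes_py_alt]
  congr 1
  exact csOuter (PySem.Dict.ofList adjacency) (PySem.Dict.ofList adjacency).keys
    PySem.Dict.empty PySem.Set.empty PySem.Dict.empty
    (fun x hx => hx) rfl (by intro x; simp [PySem.Set.empty, PySem.Dict.keys, PySem.Dict.empty])
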